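-- pv_equiv track=rewrite | github.com/NicholasShatokhin/spindl | spindl_lib/entryFormat.py | entry_month_is_valid
-- ===== SOURCE A (Python) =====
-- def entry_month_is_valid(current_date, entry_value):
--     """Checks whether the month formatted as MM/YYYY in an entry is
--     	acceptable and returns a boolean to reflect that"""
--     # If the entry value is set to the future
--     if entry_value > 0:
--         return False
--     # Get the current date tuple
--     month = current_date[1]
--     year = current_date[2]
--     # Subtract the change in months from this month
--     month = month + entry_value
--     # While change in months is greater than this month
--     while month < 1:
--         # Decrement the year by 1
--         year -= 1
--         # Set the month to December
--         month += 13
--         # If year is set to before this app was published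
--         if year < 2013:
--            return False
--     return True
-- ===== SOURCE B (Python) =====
-- def entry_month_is_valid(current_date, entry_value):
--     """Closed-form equivalent of the month-offset walk."""
--     if entry_value > 0:
--         return False
--     m = current_date[1] + entry_value
--     if m >= 1:
--         return True
--     # number of loop iterations A would perform: smallest k with m + 13*k >= 1
--     k = (13 - m) // 13
--     return current_date[2] - k >= 2013
-- ===== Notes on version B (the rewrite author's own statement) =====
-- stated objective: alternative
-- what changed: Replaces the decrement-by-13 while-loop with closed-form arithmetic: the number of iterations is computed by one floor division and the final year compared to 2013 directly.
import Mathlib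
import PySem

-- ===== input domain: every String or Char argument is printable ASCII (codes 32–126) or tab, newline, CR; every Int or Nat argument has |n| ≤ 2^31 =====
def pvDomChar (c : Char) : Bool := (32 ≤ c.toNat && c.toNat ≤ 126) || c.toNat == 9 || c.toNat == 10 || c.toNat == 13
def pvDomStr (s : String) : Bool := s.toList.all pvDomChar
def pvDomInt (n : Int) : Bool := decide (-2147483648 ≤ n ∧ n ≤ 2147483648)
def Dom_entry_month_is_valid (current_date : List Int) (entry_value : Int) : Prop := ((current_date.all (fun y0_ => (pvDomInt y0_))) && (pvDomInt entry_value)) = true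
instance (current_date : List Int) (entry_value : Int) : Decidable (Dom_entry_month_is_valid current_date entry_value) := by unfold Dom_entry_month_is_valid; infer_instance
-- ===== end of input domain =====

-- B replaces A's decrement-by-13 while-loop with one floor division and a single
-- year comparison (closed form); return-value equivalence on Pre_ is proved below.

-- ===== PORT A =====
-- the while-loop of A: while month < 1: year -= 1; month += 13; if year < 2013: return False
def emvLoop (month year : Int) : Bool :=
  if month < 1 then
    if year - 1 < 2013 then false
    else emvLoop (month + 13) (year - 1)
  else true
termination_by (1 - month).toNat
decreasing_by omega

def entry_month_is_valid (current_date : List Int) (entry_value : Int) : Bool :=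
  if entry_value > 0 then false
  else
    -- current_date[1] / current_date[2]; Pre_ guarantees the indices exist
    let month := (PySem.List.pyGet? current_date 1).getD 0
    let year := (PySem.List.pyGet? current_date 2).getD 0
    emvLoop (month + entry_value) year

-- ===== PORT B =====
def entry_month_is_valid_alt (current_date : List Int) (entry_value : Int) : Bool :=
  if entry_value > 0 then false
  else
    let m := (PySem.List.pyGet? current_date 1).getD 0 + entry_value
    if m ≥ 1 then true
    else
      let k := PySem.Int.floordiv (13 - m) 13
      decide ((PySem.List.pyGet? current_date 2).getD 0 - k ≥ 2013)

-- ===== PRECONDITION & SPEC =====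
-- Pre_ excludes exactly the inputs where both Pythons raise IndexError:
-- entry_value ≤ 0 with fewer than 3 elements in current_date.
def Pre_entry_month_is_valid (current_date : List Int) (entry_value : Int) : Prop :=
  0 < entry_value ∨ 3 ≤ current_date.length
instance (current_date : List Int) (entry_value : Int) : Decidable (Pre_entry_month_is_valid current_date entry_value) := by unfold Pre_entry_month_is_valid; infer_instance

def pvWitness_entry_month_is_valid : List Int × Int := ([5, 6, 2020], -10)

def Spec_entry_month_is_valid (current_date : List Int) (entry_value : Int) (out : Bool) : Prop := out = entry_month_is_valid_alt current_date entry_value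
instance (current_date : List Int) (entry_value : Int) (out : Bool) : Decidable (Spec_entry_month_is_valid current_date entry_value out) := by unfold Spec_entry_month_is_valid; infer_instance

-- ===== CLAIM (what is proved, stated in full; the proofs are below) =====
def Claim_equal_entry_month_is_valid : Prop := ∀ (current_date : List Int) (entry_value : Int), Dom_entry_month_is_valid current_date entry_value → Pre_entry_month_is_valid current_date entry_value → Spec_entry_month_is_valid current_date entry_value (entry_month_is_valid current_date entry_value)

-- ===== LEMMAS AND PROOFS =====

-- closed form of the loop
theorem emvLoop_eq (month year : Int) :
    emvLoop month year =
      (if month ≥ 1 then true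
       else decide (year - PySem.Int.floordiv (13 - month) 13 ≥ 2013)) := by
  induction month, year using emvLoop.induct with
  | case1 m y hm hy =>
      rw [emvLoop, PySem.Int.floordiv_eq_ediv_of_pos (show (0:Int) < 13 by omega)]
      rw [if_pos hm, if_pos hy, if_neg (show ¬ m ≥ 1 by omega), eq_comm,
          decide_eq_false_iff_not]
      omega
  | case2 m y hm hy ih =>
      rw [emvLoop]
      rw [if_pos hm, if_neg hy, ih, if_neg (show ¬ m ≥ 1 by omega)]
      rw [PySem.Int.floordiv_eq_ediv_of_pos (show (0:Int) < 13 by omega),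
          PySem.Int.floordiv_eq_ediv_of_pos (show (0:Int) < 13 by omega)]
      by_cases h13 : m + 13 ≥ 1
      · rw [if_pos h13, eq_comm, decide_eq_true_eq]
        omega
      · rw [if_neg h13]
        simp only [decide_eq_decide]
        omega
  | case3 m y hm =>
      rw [emvLoop]
      rw [if_neg hm, if_pos (by omega)]

-- ===== VERDICT (by name: the statement is the Claim_ definition above) =====
theorem entry_month_is_valid_spec : Claim_equal_entry_month_is_valid := by
  intro current_date entry_value _ _
  unfold Spec_entry_month_is_valid entry_month_is_valid entry_month_is_valid_alt
  by_cases h : entry_value > 0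
  · simp [h]
  · simp only [if_neg h]
    rw [emvLoop_eq]
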